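-- pv_equiv track=rewrite | github.com/jnzd/advent-of-code | aoc-2024/day02/day02.py | is_inc_2
-- ===== SOURCE A (Python) =====
-- def is_inc(l):
--     for i in range(len(l)-1):
--         if l[i] >= l[i+1] or l[i+1] - l[i] > 3:
--             return False
--     return True
--
-- def is_inc_2(l):
--     for i in range(len(l)):
--         if i == 0 and is_inc(l[1:]):
--             return True
--         elif i == len(l)-1 and is_inc(l[:-1]):
--             return True
--         elif is_inc(l[:i] + l[i+1:]) and is_inc([l[i-1]] + l[i+1:]):
--             return True
--     return False
-- ===== SOURCE B (Python) =====
-- def is_inc_2(l):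
--     # O(n): scan to the first bad adjacent pair; only removing one of its two
--     # endpoints can help, so test just those two removals.
--     def good(a, b):
--         return a < b <= a + 3
--
--     if not l:
--         return False
--     j = next((i for i in range(len(l) - 1) if not good(l[i], l[i + 1])), None)
--     if j is None:
--         return True
--
--     def inc(xs):
--         return all(good(xs[k], xs[k + 1]) for k in range(len(xs) - 1))
--
--     return inc(l[:j] + l[j + 1:]) or inc(l[:j + 1] + l[j + 2:])
-- ===== Notes on version B (the rewrite author's own statement) =====
-- stated objective: faster
-- what changed: B replaces A's try-removing-every-index O(n^2) loop (with redundant double is_inc checks per index) by a single scan to the first bad adjacent pair, testing only the two removals (of its left or right endpoint) that can repair it.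
import Mathlib
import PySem

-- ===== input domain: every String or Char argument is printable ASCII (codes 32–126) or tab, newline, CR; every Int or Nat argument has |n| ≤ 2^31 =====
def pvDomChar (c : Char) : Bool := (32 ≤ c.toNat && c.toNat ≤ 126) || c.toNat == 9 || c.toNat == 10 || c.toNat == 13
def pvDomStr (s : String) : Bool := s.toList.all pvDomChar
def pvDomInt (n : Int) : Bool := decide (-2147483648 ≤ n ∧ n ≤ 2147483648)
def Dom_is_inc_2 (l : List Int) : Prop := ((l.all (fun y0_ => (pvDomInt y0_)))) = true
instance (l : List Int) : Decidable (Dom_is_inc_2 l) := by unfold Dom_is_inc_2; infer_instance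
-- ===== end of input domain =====

-- B replaces A's try-every-removal O(n^2) scan by a single scan to the first bad
-- adjacent pair, testing only the two removals that can repair it (O(n)).

-- ===== PORT A =====
-- helper is_inc of A: loop over range(len(l)-1) with early return False
def isIncA (l : List Int) : List Nat → Bool
  | [] => true
  | i :: rest =>
    if l.getD i 0 ≥ l.getD (i+1) 0 ∨ l.getD (i+1) 0 - l.getD i 0 > 3 then false
    else isIncA l rest

def isInc (l : List Int) : Bool := isIncA l (List.range (l.length - 1))

-- main loop of A: for i in range(len(l)) with early return True
def isInc2A (l : List Int) : List Nat → Bool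
  | [] => false
  | i :: rest =>
    if i == 0 && isInc (l.drop 1) then true
    else if i == l.length - 1 && isInc (l.take (l.length - 1)) then true
    else if isInc (l.take i ++ l.drop (i+1)) &&
            isInc (PySem.List.pyGetD l ((i : Int) - 1) 0 :: l.drop (i+1)) then true
    else isInc2A l rest

def is_inc_2 (l : List Int) : Bool := isInc2A l (List.range l.length)

-- ===== PORT B =====
def goodB (a b : Int) : Bool := decide (a < b) && decide (b ≤ a + 3)

-- first index i with a bad pair (l[i], l[i+1]); `next(..., None)`
def firstBad (l : List Int) : List Nat → Option Nat
  | [] => none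
  | i :: rest =>
    if !(goodB (l.getD i 0) (l.getD (i+1) 0)) then some i else firstBad l rest

-- inner `inc`: all adjacent pairs good
def incB (xs : List Int) : Bool :=
  (List.range (xs.length - 1)).all (fun k => goodB (xs.getD k 0) (xs.getD (k+1) 0))

def is_inc_2_alt (l : List Int) : Bool :=
  if l.isEmpty then false
  else
    match firstBad l (List.range (l.length - 1)) with
    | none => true
    | some j => incB (l.take j ++ l.drop (j+1)) || incB (l.take (j+1) ++ l.drop (j+2))

-- ===== PRECONDITION & SPEC =====
def Spec_is_inc_2 (l : List Int) (out : Bool) : Prop := out = is_inc_2_alt l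
instance (l : List Int) (out : Bool) : Decidable (Spec_is_inc_2 l out) := by unfold Spec_is_inc_2; infer_instance

-- ===== CLAIM (what is proved, stated in full; the proofs are below) =====
def Claim_equal_is_inc_2 : Prop := ∀ (l : List Int), Dom_is_inc_2 l → Spec_is_inc_2 l (is_inc_2 l)

-- ===== LEMMAS AND PROOFS =====

lemma good_false_iff (a b : Int) : goodB a b = false ↔ a ≥ b ∨ b - a > 3 := by
  simp [goodB]; omega

lemma good_true_iff (a b : Int) : goodB a b = true ↔ ¬(a ≥ b ∨ b - a > 3) := by
  simp [goodB]; omega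

lemma isIncA_all (l : List Int) (is : List Nat) :
    isIncA l is = is.all (fun i => goodB (l.getD i 0) (l.getD (i+1) 0)) := by
  induction is with
  | nil => rfl
  | cons i rest ih =>
      rw [isIncA, List.all_cons, ← ih]
      by_cases h : l.getD i 0 ≥ l.getD (i+1) 0 ∨ l.getD (i+1) 0 - l.getD i 0 > 3
      · rw [if_pos h, (good_false_iff _ _).mpr h]; simp
      · rw [if_neg h, (good_true_iff _ _).mpr h]; simp

lemma isInc_eq_incB (l : List Int) : isInc l = incB l := by
  rw [isInc, incB, isIncA_all]

lemma incB_iff (xs : List Int) :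
    incB xs = true ↔ ∀ k, k + 1 < xs.length → goodB (xs.getD k 0) (xs.getD (k+1) 0) = true := by
  simp only [incB, List.all_eq_true, List.mem_range]
  constructor
  · intro h k hk; exact h k (by omega)
  · intro h k hk; exact h k (by omega)

lemma len_rm (l : List Int) (i : Nat) (hi : i < l.length) :
    (l.take i ++ l.drop (i+1)).length = l.length - 1 := by
  simp [List.length_append, List.length_take, List.length_drop]; omega

lemma getD_drop (l : List Int) (m k : Nat) (h : m + k < l.length) :
    (l.drop m).getD k 0 = l.getD (m + k) 0 := by
  rw [List.getD_eq_getElem _ _ (by simp; omega), List.getD_eq_getElem _ _ (by omega)]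
  simp [List.getElem_drop]

lemma getD_rm (l : List Int) (i k : Nat) (hi : i < l.length) (_hk : k < l.length - 1) :
    (l.take i ++ l.drop (i+1)).getD k 0 = if k < i then l.getD k 0 else l.getD (k+1) 0 := by
  have ht : (l.take i).length = i := by simp [List.length_take]; omega
  by_cases hki : k < i
  · rw [if_pos hki]
    simp only [List.getD]
    rw [List.getElem?_append_left (by omega), List.getElem?_take_of_lt hki]
  · rw [if_neg hki]
    simp only [List.getD]
    rw [List.getElem?_append_right (by omega), List.getElem?_drop, ht]
    have e : i + 1 + (k - i) = k + 1 := by omega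
    rw [e]

-- A's redundant second conjunct is implied by the first
lemma cons_tail_inc (l : List Int) (i : Nat) (h0 : 0 < i) (hi : i < l.length - 1)
    (h : incB (l.take i ++ l.drop (i+1)) = true) :
    incB (l.getD (i-1) 0 :: l.drop (i+1)) = true := by
  rw [incB_iff] at h ⊢
  have hlen : (l.take i ++ l.drop (i+1)).length = l.length - 1 := len_rm l i (by omega)
  intro k hk
  simp only [List.length_cons, List.length_drop] at hk
  cases k with
  | zero =>
    have h1 := h (i-1) (by rw [hlen]; omega)
    have e : i - 1 + 1 = i := by omega
    rw [e, getD_rm l i (i-1) (by omega) (by omega), if_pos (by omega),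
        getD_rm l i i (by omega) (by omega), if_neg (by omega)] at h1
    simpa [getD_drop l (i+1) 0 (by omega)] using h1
  | succ k' =>
    have h1 := h (i+k') (by rw [hlen]; omega)
    rw [getD_rm l i (i+k') (by omega) (by omega), if_neg (by omega),
        getD_rm l i (i+k'+1) (by omega) (by omega), if_neg (by omega)] at h1
    have e1 : i + 1 + k' = i + k' + 1 := by omega
    have e2 : i + 1 + (k' + 1) = i + k' + 1 + 1 := by omega
    simp only [List.getD_cons_succ]
    rw [getD_drop l (i+1) k' (by omega), getD_drop l (i+1) (k'+1) (by omega), e1, e2]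
    exact h1

-- one step of A's loop body equals "the i-th removal works"
lemma stepA (l : List Int) (i : Nat) (hi : i < l.length) (c : Bool) :
    (if i == 0 && incB (l.drop 1) then true
     else if i == l.length - 1 && incB (l.take (l.length - 1)) then true
     else if incB (l.take i ++ l.drop (i+1)) &&
             incB (PySem.List.pyGetD l ((i : Int) - 1) 0 :: l.drop (i+1)) then true
     else c) = (incB (l.take i ++ l.drop (i+1)) || c) := by
  by_cases h0 : i = 0
  · subst h0
    simp only [List.take_zero, List.nil_append, Nat.zero_add]
    cases hinc : incB (l.drop 1) with
    | true => simp
    | false =>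
      have hlen1 : l.length ≠ 1 := by
        intro e
        have hd : l.drop 1 = [] := by
          apply List.drop_eq_nil_of_le; omega
        rw [hd] at hinc
        simp [incB] at hinc
      have hb2 : (0 == l.length - 1) = false := by
        simp only [beq_eq_false_iff_ne]; omega
      simp [hb2]
  · by_cases h1 : i = l.length - 1
    · have hd : l.drop (i+1) = [] := by
        apply List.drop_eq_nil_of_le; omega
      have hb1 : (i == 0) = false := by simp only [beq_eq_false_iff_ne]; exact h0
      have htk : l.take i ++ l.drop (i+1) = l.take (l.length - 1) := by
        rw [hd, List.append_nil, h1]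
      have hb2 : (i == l.length - 1) = true := by simp [h1]
      rw [htk]
      cases hinc : incB (l.take (l.length - 1)) with
      | true => simp [hb1, hb2]
      | false => simp [hb1, hb2]
    · have hb1 : (i == 0) = false := by simp only [beq_eq_false_iff_ne]; exact h0
      have hb2 : (i == l.length - 1) = false := by simp only [beq_eq_false_iff_ne]; exact h1
      cases hinc : incB (l.take i ++ l.drop (i+1)) with
      | false => simp [hb1, hb2]
      | true =>
        have hcast : (i : Int) - 1 = ((i - 1 : Nat) : Int) := by omega
        have hcons : incB (PySem.List.pyGetD l ((i : Int) - 1) 0 :: l.drop (i+1)) = true := by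
          rw [hcast, PySem.List.pyGetD_natCast]
          exact cons_tail_inc l i (by omega) (by omega) hinc
        simp [hb1, hb2, hcons]

lemma isInc2A_any (l : List Int) (is : List Nat) (h : ∀ i ∈ is, i < l.length) :
    isInc2A l is = is.any (fun i => incB (l.take i ++ l.drop (i+1))) := by
  induction is with
  | nil => rfl
  | cons i rest ih =>
    have hi : i < l.length := h i (by simp)
    rw [isInc2A, List.any_cons, ← ih (fun j hj => h j (by simp [hj]))]
    simp only [isInc_eq_incB]
    exact stepA l i hi _

lemma firstBad_none (l : List Int) (is : List Nat) (h : firstBad l is = none) :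
    ∀ i ∈ is, goodB (l.getD i 0) (l.getD (i+1) 0) = true := by
  induction is with
  | nil => simp
  | cons i rest ih =>
    rw [firstBad] at h
    split_ifs at h with hg
    · intro j hj
      rcases List.mem_cons.mp hj with e | hm
      · subst e
        revert hg; cases goodB (l.getD j 0) (l.getD (j+1) 0) <;> simp
      · exact ih h j hm
  
lemma firstBad_some (l : List Int) (is : List Nat) (j : Nat) (h : firstBad l is = some j) :
    j ∈ is ∧ goodB (l.getD j 0) (l.getD (j+1) 0) = false := by
  induction is with
  | nil => simp [firstBad] at h
  | cons i rest ih =>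
    rw [firstBad] at h
    split_ifs at h with hg
    · have e : i = j := by simpa using h
      refine ⟨by simp [e], ?_⟩
      rw [← e]
      revert hg; cases goodB (l.getD i 0) (l.getD (i+1) 0) <;> simp
    · obtain ⟨hm, hb⟩ := ih h
      exact ⟨by simp [hm], hb⟩

lemma rm_bad (l : List Int) (j i : Nat) (hj : j + 1 < l.length)
    (hbad : goodB (l.getD j 0) (l.getD (j+1) 0) = false)
    (hi : i < l.length) (hij : i ≠ j) (hij1 : i ≠ j + 1) :
    incB (l.take i ++ l.drop (i+1)) = false := by
  cases hv : incB (l.take i ++ l.drop (i+1)) with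
  | false => rfl
  | true =>
    exfalso
    have h := (incB_iff _).mp hv
    have hlen : (l.take i ++ l.drop (i+1)).length = l.length - 1 := len_rm l i hi
    rcases Nat.lt_or_ge i j with hlt | hge
    · have h1 := h (j-1) (by rw [hlen]; omega)
      have e : j - 1 + 1 = j := by omega
      rw [e, getD_rm l i (j-1) hi (by omega), if_neg (by omega),
          getD_rm l i j hi (by omega), if_neg (by omega), e] at h1
      rw [h1] at hbad; simp at hbad
    · have hgt : j + 1 < i := by omega
      have h1 := h j (by rw [hlen]; omega)
      rw [getD_rm l i j hi (by omega), if_pos (by omega),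
          getD_rm l i (j+1) hi (by omega), if_pos (by omega)] at h1
      rw [h1] at hbad; simp at hbad

-- ===== VERDICT (by name: the statement is the Claim_ definition above) =====
theorem is_inc_2_spec : Claim_equal_is_inc_2 := by
  intro l _
  show is_inc_2 l = is_inc_2_alt l
  rw [is_inc_2, isInc2A_any l _ (fun i hi => List.mem_range.mp hi)]
  unfold is_inc_2_alt
  by_cases hemp : l.isEmpty
  · obtain rfl : l = [] := List.isEmpty_iff.mp hemp
    simp
  · rw [if_neg hemp]
    have hn : 0 < l.length := by
      cases l with
      | nil => simp at hemp
      | cons a t => simp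
    cases hfb : firstBad l (List.range (l.length - 1)) with
    | none =>
      have hall : incB l = true := by
        rw [incB_iff]; intro k hk
        exact firstBad_none l _ hfb k (List.mem_range.mpr (by omega))
      have h0 : incB (l.take 0 ++ l.drop (0+1)) = true := by
        simp only [List.take_zero, List.nil_append]
        rw [incB_iff] at hall ⊢
        intro k hk
        simp only [List.length_drop] at hk
        rw [getD_drop l 1 k (by omega), getD_drop l 1 (k+1) (by omega)]
        have e : 1 + (k + 1) = 1 + k + 1 := by omega
        rw [e]
        exact hall (1+k) (by omega)
      rw [List.any_eq_true.mpr ⟨0, List.mem_range.mpr hn, h0⟩]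
    | some j =>
      obtain ⟨hjmem, hbad⟩ := firstBad_some l _ j hfb
      have hj : j < l.length - 1 := List.mem_range.mp hjmem
      cases hA : incB (l.take j ++ l.drop (j+1)) with
      | true =>
        rw [List.any_eq_true.mpr ⟨j, List.mem_range.mpr (by omega), hA⟩]
        simp [hA]
      | false =>
        cases hB : incB (l.take (j+1) ++ l.drop (j+2)) with
        | true =>
          have hB' : incB (l.take (j+1) ++ l.drop (j+1+1)) = true := hB
          rw [List.any_eq_true.mpr ⟨j+1, List.mem_range.mpr (by omega), hB'⟩]
          simp [hB]
        | false =>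
          have hany : (List.range l.length).any
              (fun i => incB (l.take i ++ l.drop (i+1))) = false := by
            rw [List.any_eq_false]
            intro i hi'
            have hi : i < l.length := List.mem_range.mp hi'
            by_cases e1 : i = j
            · subst e1; simp [hA]
            · by_cases e2 : i = j + 1
              · subst e2
                simpa using hB
              · simp [rm_bad l j i (by omega) hbad hi e1 e2]
          rw [hany]
          simp [hA, hB]
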